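-- pv_equiv track=rewrite | github.com/orions-stardom/aoc-2022 | day_25.py | snafu2int
-- ===== SOURCE A (Python) =====
-- def snafu2int(snafu:str) -> int:
--     """
--     >>> snafu2int("1=-0-2")
--     1747
--     >>> snafu2int("20012")
--     1257
--     >>> snafu2int("1121-1110-1=0")
--     314159265
--     """
--     n = 0
--     for digit in snafu:
--         n *= 5
--         match digit:
--             case "-":
--                 n -= 1
--             case "=":
--                 n -= 2
--             case d:
--                 n += int(d)
--     return n
-- ===== SOURCE B (Python) =====
-- def snafu2int(snafu: str) -> int:
--     total = 0
--     for i, digit in enumerate(reversed(snafu)):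
--         if digit == "-":
--             total -= 5 ** i
--         elif digit == "=":
--             total -= 2 * 5 ** i
--         else:
--             total += int(digit) * 5 ** i
--     return total
-- ===== Notes on version B (the rewrite author's own statement) =====
-- stated objective: alternative
-- what changed: Replaces Horner's left-to-right multiply-accumulate with explicit positional weighting: each digit of the reversed string is multiplied by 5**i and summed, changing the maintained state and traversal direction.
-- outside the precondition, e.g. on snafu2int('1x2'): A raises ValueError, B raises ValueError
import Mathlib
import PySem

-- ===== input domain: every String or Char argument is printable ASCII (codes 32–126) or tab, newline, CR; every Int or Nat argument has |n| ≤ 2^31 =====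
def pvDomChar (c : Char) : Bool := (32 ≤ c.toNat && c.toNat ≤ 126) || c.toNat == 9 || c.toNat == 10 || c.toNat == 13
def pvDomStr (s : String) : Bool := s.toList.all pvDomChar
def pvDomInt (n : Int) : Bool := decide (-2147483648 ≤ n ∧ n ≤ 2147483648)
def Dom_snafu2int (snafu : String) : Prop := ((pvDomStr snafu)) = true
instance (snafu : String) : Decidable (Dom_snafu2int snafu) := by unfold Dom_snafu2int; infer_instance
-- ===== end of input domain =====

-- B replaces A's Horner multiply-accumulate with explicit positional weighting (digit * 5^i over the reversed string); same O(n) cost, different maintained state.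


-- ===== PORT A =====
-- Horner loop: n = 5*n then branch on the digit; int(d) is PySem.Int.ofStr? (exact; none = ValueError,
-- which never occurs under Pre_, so getD 0 is never the value used).
def snafu2int (snafu : String) : Int :=
  snafu.toList.foldl
    (fun n digit =>
      let n := n * 5
      if digit == '-' then n - 1
      else if digit == '=' then n - 2
      else n + (PySem.Int.ofStr? (String.singleton digit)).getD 0) 0

-- ===== PORT B =====
-- enumerate(reversed(snafu)) then sum digit-value * 5**i.
def snafu2int_alt (snafu : String) : Int :=
  (PySem.List.enumerate snafu.toList.reverse).foldl
    (fun total p =>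
      if p.2 == '-' then total - 5 ^ p.1.toNat
      else if p.2 == '=' then total - 2 * 5 ^ p.1.toNat
      else total + (PySem.Int.ofStr? (String.singleton p.2)).getD 0 * 5 ^ p.1.toNat) 0

-- ===== PRECONDITION & SPEC =====
-- Pre_ admits exactly the strings A accepts: every character is '-', '=' or a decimal digit;
-- on any other character int(d) raises ValueError in both A and B.
def Pre_snafu2int (snafu : String) : Prop :=
  snafu.toList.all (fun c => c == '-' || c == '=' || c.isDigit) = true
instance (snafu : String) : Decidable (Pre_snafu2int snafu) := by unfold Pre_snafu2int; infer_instance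
def pvWitness_snafu2int : String := "1=-0-2"

def Spec_snafu2int (snafu : String) (out : Int) : Prop := out = snafu2int_alt snafu
instance (snafu : String) (out : Int) : Decidable (Spec_snafu2int snafu out) := by unfold Spec_snafu2int; infer_instance

-- ===== CLAIM (what is proved, stated in full; the proofs are below) =====
def Claim_equal_snafu2int : Prop := ∀ (snafu : String), Dom_snafu2int snafu → Pre_snafu2int snafu → Spec_snafu2int snafu (snafu2int snafu)

-- ===== LEMMAS AND PROOFS =====

-- the common digit value
def pvVal (c : Char) : Int :=
  if c == '-' then -1
  else if c == '=' then -2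
  else (PySem.Int.ofStr? (String.singleton c)).getD 0

-- positional polynomial, starting at weight 5^s
def pvPoly : List Char → Int → Int
  | [], _ => 0
  | c :: m, s => pvVal c * 5 ^ s.toNat + pvPoly m (s + 1)

theorem pvFoldB (m : List Char) : ∀ (t s : Int),
    (PySem.List.enumerate m s).foldl
      (fun total p =>
        if p.2 == '-' then total - 5 ^ p.1.toNat
        else if p.2 == '=' then total - 2 * 5 ^ p.1.toNat
        else total + (PySem.Int.ofStr? (String.singleton p.2)).getD 0 * 5 ^ p.1.toNat) t
    = t + pvPoly m s := by
  induction m with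
  | nil => intro t s; simp [PySem.List.enumerate, pvPoly]
  | cons c m ih =>
    intro t s
    rw [PySem.List.enumerate_cons, List.foldl_cons, ih, pvPoly]
    simp only [pvVal]
    split_ifs <;> ring

theorem pvPoly_append (c : Char) (m : List Char) : ∀ (s : Int), 0 ≤ s →
    pvPoly (m ++ [c]) s = pvPoly m s + pvVal c * 5 ^ (s.toNat + m.length) := by
  induction m with
  | nil => intro s _; simp [pvPoly]
  | cons d m ih =>
    intro s hs
    have h1 : (s + 1).toNat = s.toNat + 1 := by omega
    simp only [List.cons_append, pvPoly, ih (s + 1) (by omega), h1, List.length_cons]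
    ring

theorem pvFoldA (l : List Char) : ∀ (n : Int),
    l.foldl
      (fun n digit =>
        let n := n * 5
        if digit == '-' then n - 1
        else if digit == '=' then n - 2
        else n + (PySem.Int.ofStr? (String.singleton digit)).getD 0) n
    = n * 5 ^ l.length + pvPoly l.reverse 0 := by
  induction l with
  | nil => intro n; simp [pvPoly]
  | cons c l ih =>
    intro n
    rw [List.foldl_cons, ih, List.reverse_cons, pvPoly_append c l.reverse 0 le_rfl]
    simp only [List.length_reverse, List.length_cons, pow_succ, pvVal, Int.toNat_zero,
      Nat.zero_add]
    split_ifs <;> ring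

-- ===== VERDICT (by name: the statement is the Claim_ definition above) =====
theorem snafu2int_spec : Claim_equal_snafu2int := by
  intro snafu _ _
  unfold Spec_snafu2int snafu2int snafu2int_alt
  rw [pvFoldA, pvFoldB]
  ring
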